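-- pv_equiv track=rewrite | github.com/haideeyuan/FastDLTsim | utilis.py | get_first_job_in_workloads
-- ===== SOURCE A (Python) =====
-- def get_first_job_in_workloads(Workloads):
--     """
--     Get the job_id with min(sub_time) and max(score)
--     :return: A str. Represents a job_id.
--     """
--     job_id = list(Workloads.keys())[0]
--     same_time = list()
--     for _job_id in Workloads.keys():
--         if Workloads[_job_id]["submit_time"] < Workloads[job_id]["submit_time"]:
--             job_id = _job_id
--     for _job_id in Workloads.keys():
--         if Workloads[_job_id]["submit_time"] == Workloads[job_id]["submit_time"]:
--             same_time.append(_job_id)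
--     if len(same_time) > 1:
--         for _job_id in same_time:
--             if Workloads[_job_id]["score"] > Workloads[job_id]["score"]:
--                 job_id = _job_id
--     return job_id
-- ===== SOURCE B (Python) =====
-- def get_first_job_in_workloads(Workloads):
--     """
--     Get the job_id with min(sub_time) and max(score)
--     :return: A str. Represents a job_id.
--     """
--     return min(Workloads,
--                key=lambda j: (Workloads[j]["submit_time"], -Workloads[j]["score"]))
-- ===== Notes on version B (the rewrite author's own statement) =====
-- stated objective: idiomatic
-- what changed: Replaced A's three sequential scans (argmin of submit_time, collecting the tie set, argmax of score over it) by a single builtin min() with the composite key (submit_time, -score), whose first-minimal tie rule reproduces A's result exactly.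
-- outside the precondition, e.g. on get_first_job_in_workloads({'a': {'submit_time': 0}}): A returns 'a', B raises KeyError
import Mathlib
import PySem

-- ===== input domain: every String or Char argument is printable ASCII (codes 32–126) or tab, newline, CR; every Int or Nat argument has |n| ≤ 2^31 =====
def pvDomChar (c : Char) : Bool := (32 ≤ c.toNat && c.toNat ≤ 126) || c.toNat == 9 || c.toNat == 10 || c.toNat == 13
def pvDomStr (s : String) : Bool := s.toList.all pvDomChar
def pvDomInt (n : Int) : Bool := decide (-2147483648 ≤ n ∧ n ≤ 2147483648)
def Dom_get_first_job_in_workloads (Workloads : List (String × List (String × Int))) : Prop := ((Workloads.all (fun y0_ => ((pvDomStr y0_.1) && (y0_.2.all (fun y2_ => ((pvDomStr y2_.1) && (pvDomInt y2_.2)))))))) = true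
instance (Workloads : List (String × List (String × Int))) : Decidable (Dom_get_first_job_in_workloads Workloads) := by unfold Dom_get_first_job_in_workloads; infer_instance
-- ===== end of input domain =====

-- B replaces A's three scans (argmin submit_time, tie collection, argmax score) by one builtin
-- min() with composite key (submit_time, -score); same return value (first-minimal tie rule).

-- shared field access: Workloads[j][k] (the 0 default is only reached outside Pre_)
def pvFld (d : PySem.Dict String (List (String × Int))) (j k : String) : Int :=
  (PySem.Dict.ofList (d.getD j [])).getD k 0

-- ===== PORT A =====
def get_first_job_in_workloads (Workloads : List (String × List (String × Int))) : String :=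
  let d := PySem.Dict.ofList Workloads
  -- job_id = list(Workloads.keys())[0]  (IndexError on an empty dict: excluded by Pre_)
  let job0 := (PySem.List.pyGet? d.keys (0 : Int)).getD ""
  let job1 := d.keys.foldl (fun job j => if pvFld d j "submit_time" < pvFld d job "submit_time" then j else job) job0
  let same := d.keys.foldl (fun acc j => if pvFld d j "submit_time" == pvFld d job1 "submit_time" then acc ++ [j] else acc) ([] : List String)
  if same.length > 1 then
    same.foldl (fun job j => if pvFld d j "score" > pvFld d job "score" then j else job) job1
  else job1

-- ===== PORT B =====
def get_first_job_in_workloads_alt (Workloads : List (String × List (String × Int))) : String :=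
  let d := PySem.Dict.ofList Workloads
  match PySem.List.min2? d.keys (fun j => pvFld d j "submit_time") (fun j => -(pvFld d j "score")) with
  | some j => j
  | none => ""   -- empty dict: Python min() raises ValueError; excluded by Pre_

-- ===== PRECONDITION & SPEC =====
-- Pre_ excludes the empty dict (A raises IndexError, B's min() raises ValueError) and workloads in
-- which some entry lacks a "submit_time" or "score" field: there A may raise KeyError, or (when the
-- missing "score" is never reached because there is no submit_time tie) A returns while B raises.
def Pre_get_first_job_in_workloads (Workloads : List (String × List (String × Int))) : Prop :=
  Workloads ≠ [] ∧ ∀ p ∈ (PySem.Dict.ofList Workloads).items,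
    (PySem.Dict.ofList p.2).contains "submit_time" = true ∧ (PySem.Dict.ofList p.2).contains "score" = true
instance (Workloads : List (String × List (String × Int))) : Decidable (Pre_get_first_job_in_workloads Workloads) := by unfold Pre_get_first_job_in_workloads; infer_instance
def pvWitness_get_first_job_in_workloads : (List (String × List (String × Int))) :=
  [("a", [("submit_time", 1), ("score", 2)]), ("b", [("submit_time", 1), ("score", 3)])]

def Spec_get_first_job_in_workloads (Workloads : List (String × List (String × Int))) (out : String) : Prop := out = get_first_job_in_workloads_alt Workloads
instance (Workloads : List (String × List (String × Int))) (out : String) : Decidable (Spec_get_first_job_in_workloads Workloads out) := by unfold Spec_get_first_job_in_workloads; infer_instance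

-- ===== CLAIM (what is proved, stated in full; the proofs are below) =====
def Claim_equal_get_first_job_in_workloads : Prop := ∀ (Workloads : List (String × List (String × Int))), Dom_get_first_job_in_workloads Workloads → Pre_get_first_job_in_workloads Workloads → Spec_get_first_job_in_workloads Workloads (get_first_job_in_workloads Workloads)

-- ===== LEMMAS AND PROOFS =====

/-- Keep-first extremal fold: the result splits the list into a strictly-beaten prefix and a
never-beating suffix. -/
theorem pvFoldFirst {α : Type} (lt : α → α → Prop) [DecidableRel lt]
    (hconn : ∀ a b c, lt a b → ¬ lt c b → lt a c)
    (hasym : ∀ a b, lt a b → ¬ lt b a) :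
    ∀ (t : List α) (b : α), ∃ p s,
      b :: t = p ++ (t.foldl (fun acc j => if lt j acc then j else acc) b) :: s ∧
      (∀ y ∈ p, lt (t.foldl (fun acc j => if lt j acc then j else acc) b) y) ∧
      (∀ y ∈ s, ¬ lt y (t.foldl (fun acc j => if lt j acc then j else acc) b)) := by
  intro t
  induction t with
  | nil => exact fun b => ⟨[], [], rfl, by simp, by simp⟩
  | cons x t ih =>
    intro b
    by_cases hxb : lt x b
    · obtain ⟨p, s, hdec, hp, hs⟩ := ih x
      rw [show List.foldl (fun acc j => if lt j acc then j else acc) b (x :: t)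
            = List.foldl (fun acc j => if lt j acc then j else acc) x t by simp [hxb]]
      refine ⟨b :: p, s, by rw [List.cons_append, ← hdec], ?_, hs⟩
      intro y hy
      rcases List.mem_cons.mp hy with rfl | hyp
      · cases p with
        | nil =>
          have := (List.cons.injEq _ _ _ _).mp hdec
          rw [← this.1]; exact hxb
        | cons z p' =>
          have hz := (List.cons.injEq _ _ _ _).mp hdec
          have hrx : lt (List.foldl (fun acc j => if lt j acc then j else acc) x t) x := by
            have := hp z (List.mem_cons_self ..)
            rwa [← hz.1] at this
          exact hconn _ _ _ hrx (hasym _ _ hxb)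
      · exact hp y hyp
    · obtain ⟨p, s, hdec, hp, hs⟩ := ih b
      rw [show List.foldl (fun acc j => if lt j acc then j else acc) b (x :: t)
            = List.foldl (fun acc j => if lt j acc then j else acc) b t by simp [hxb]]
      cases p with
      | nil =>
        have h := (List.cons.injEq _ _ _ _).mp hdec
        refine ⟨[], x :: t, by rw [← h.1]; rfl, by simp, ?_⟩
        intro y hy
        rcases List.mem_cons.mp hy with rfl | hyt
        · rw [← h.1]; exact hxb
        · rw [h.2] at hyt; exact hs y hyt
      | cons z p' =>
        have h := (List.cons.injEq _ _ _ _).mp hdec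
        refine ⟨b :: x :: p', s, by (conv_lhs => rw [h.2]); rfl, ?_, hs⟩
        have hrb : lt (List.foldl (fun acc j => if lt j acc then j else acc) b t) b := by
          have := hp z (List.mem_cons_self ..)
          rwa [← h.1] at this
        intro y hy
        rcases List.mem_cons.mp hy with rfl | hy
        · exact hrb
        rcases List.mem_cons.mp hy with rfl | hy
        · exact hconn _ _ _ hrb hxb
        · exact hp y (List.mem_cons_of_mem _ hy)

/-- A decomposition of a filtered list lifts back to the original list. -/
theorem pvFilterSplit {α : Type} (c : α → Bool) :
    ∀ (l u : List α) (x : α) (v : List α), l.filter c = u ++ x :: v →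
      ∃ q q', l = q ++ x :: q' ∧ q.filter c = u ∧ q'.filter c = v := by
  intro l
  induction l with
  | nil => intro u x v h; simp at h
  | cons a t ih =>
    intro u x v hf
    by_cases hc : c a
    · rw [List.filter_cons_of_pos hc] at hf
      cases u with
      | nil =>
        have h := (List.cons.injEq _ _ _ _).mp hf
        exact ⟨[], t, by rw [h.1]; rfl, rfl, h.2⟩
      | cons u0 u' =>
        have h := (List.cons.injEq _ _ _ _).mp hf
        obtain ⟨q, q', rfl, hq, hq'⟩ := ih u' x v h.2
        exact ⟨a :: q, q', rfl, by rw [List.filter_cons_of_pos hc, hq, h.1], hq'⟩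
    · rw [List.filter_cons_of_neg hc] at hf
      obtain ⟨q, q', rfl, hq, hq'⟩ := ih u x v hf
      exact ⟨a :: q, q', rfl, by rw [List.filter_cons_of_neg hc, hq], hq'⟩

/-- min2? on a nonempty list is the keep-first lexicographic-min fold from the head. -/
theorem pvMin2SomeFold {α : Type} (k1 k2 : α → Int) :
    ∀ (t : List α) (b : α),
      List.foldl
        (fun acc x =>
          match acc with
          | none => some x
          | some m => if (decide (k1 x < k1 m) || !decide (k1 m < k1 x) && decide (k2 x < k2 m)) = true then some x else some m)
        (some b) t
      = some (t.foldl (fun m x => if k1 x < k1 m ∨ (k1 x = k1 m ∧ k2 x < k2 m) then x else m) b) := by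
  intro t
  induction t with
  | nil => intro b; rfl
  | cons x t ih =>
    intro b
    rw [List.foldl_cons, List.foldl_cons]
    have hstep : (match some b with
          | none => some x
          | some m => if (decide (k1 x < k1 m) || !decide (k1 m < k1 x) && decide (k2 x < k2 m)) = true then some x else some m)
        = (if (decide (k1 x < k1 b) || !decide (k1 b < k1 x) && decide (k2 x < k2 b)) = true then some x else some b) := rfl
    rw [hstep]
    have hcond : ((decide (k1 x < k1 b) || !decide (k1 b < k1 x) && decide (k2 x < k2 b)) = true)
        ↔ (k1 x < k1 b ∨ (k1 x = k1 b ∧ k2 x < k2 b)) := by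
      simp only [Bool.or_eq_true, Bool.and_eq_true, Bool.not_eq_true', decide_eq_true_eq,
        decide_eq_false_iff_not]
      omega
    by_cases h : k1 x < k1 b ∨ (k1 x = k1 b ∧ k2 x < k2 b)
    · rw [if_pos (hcond.mpr h), if_pos h]
      exact ih x
    · rw [if_neg (fun hb => h (hcond.mp hb)), if_neg h]
      exact ih b

theorem pvMin2Cons {α : Type} (k1 k2 : α → Int) (b : α) (t : List α) :
    PySem.List.min2? (b :: t) k1 k2
      = some (t.foldl (fun m x => if k1 x < k1 m ∨ (k1 x = k1 m ∧ k2 x < k2 m) then x else m) b) := by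
  show List.foldl _ (some b) t = _
  exact pvMin2SomeFold k1 k2 t b

/-- Uniqueness of the "first element no later element beats" decomposition. -/
theorem pvFirstUnique {α : Type} (lt : α → α → Prop) (ks p1 s1 p2 s2 : List α) (r1 r2 : α)
    (h1 : ks = p1 ++ r1 :: s1) (h2 : ks = p2 ++ r2 :: s2)
    (hmin1 : ∀ y ∈ ks, ¬ lt y r1) (hmin2 : ∀ y ∈ ks, ¬ lt y r2)
    (hfst1 : ∀ y ∈ p1, lt r1 y) (hfst2 : ∀ y ∈ p2, lt r2 y) : r1 = r2 := by
  have hl1 : p1.length < ks.length := by rw [h1]; simp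
  have hl2 : p2.length < ks.length := by rw [h2]; simp
  have e1 : ks[p1.length]'hl1 = r1 := by
    simp only [h1]
    rw [List.getElem_append_right (Nat.le_refl _)]
    simp
  have e2 : ks[p2.length]'hl2 = r2 := by
    simp only [h2]
    rw [List.getElem_append_right (Nat.le_refl _)]
    simp
  rcases lt_trichotomy p1.length p2.length with hlt | heq | hgt
  · exfalso
    have hr1p2 : r1 ∈ p2 := by
      rw [← e1]
      simp only [h2]
      rw [List.getElem_append_left hlt]
      exact List.getElem_mem _
    exact hmin1 r2 (h2 ▸ (by simp)) (hfst2 r1 hr1p2)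
  · rw [← e1, ← e2]; congr 1
  · exfalso
    have hr2p1 : r2 ∈ p1 := by
      rw [← e2]
      simp only [h1]
      rw [List.getElem_append_left hgt]
      exact List.getElem_mem _
    exact hmin2 r1 (h1 ▸ (by simp)) (hfst1 r2 hr2p1)

/-- Core equivalence over an arbitrary key list and field projections. -/
theorem pvMainEq {α : Type} (st sc : α → Int) (k0 : α) (t : List α) :
    (let j1 := (k0 :: t).foldl (fun job j => if st j < st job then j else job) k0
     let same := (k0 :: t).foldl (fun acc j => if st j == st j1 then acc ++ [j] else acc) ([] : List α)
     if same.length > 1 then same.foldl (fun job j => if sc j > sc job then j else job) j1 else j1)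
    = t.foldl (fun m x => if st x < st m ∨ (st x = st m ∧ -sc x < -sc m) then x else m) k0 := by
  simp only [gt_iff_lt]
  have hj1 : List.foldl (fun job j => if st j < st job then j else job) k0 (k0 :: t)
      = List.foldl (fun job j => if st j < st job then j else job) k0 t := by
    rw [List.foldl_cons, if_neg (lt_irrefl _)]
  rw [hj1]
  set j1 := List.foldl (fun job j => if st j < st job then j else job) k0 t with hj1d
  -- characterize the first fold
  obtain ⟨p, s, hdec, hp, hs⟩ :=
    pvFoldFirst (fun a b => st a < st b) (fun a b c h1 h2 => by omega)
      (fun a b h => by omega) t k0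
  rw [show List.foldl (fun acc j => if (fun a b : α => st a < st b) j acc then j else acc) k0 t
        = j1 from rfl] at hdec hp hs
  -- the second fold is a filter
  have hsame : List.foldl (fun acc j => if st j == st j1 then acc ++ [j] else acc)
      ([] : List α) (k0 :: t) = (k0 :: t).filter (fun j => st j == st j1) := by
    simpa using PySem.List.foldl_append_if (fun j => st j == st j1) (fun j => j) (k0 :: t) []
  rw [hsame]
  have hpfil : p.filter (fun j => st j == st j1) = [] := by
    rw [List.filter_eq_nil_iff]
    intro y hy
    have := hp y hy
    simp only [beq_iff_eq]
    omega
  have hfc : (k0 :: t).filter (fun j => st j == st j1)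
      = j1 :: s.filter (fun j => st j == st j1) := by
    rw [hdec, List.filter_append, hpfil, List.nil_append,
      List.filter_cons_of_pos (by simp)]
  rw [hfc]
  set rest := s.filter (fun j => st j == st j1) with hrd
  -- collapse the guarded third fold
  have hAres : (if (j1 :: rest).length > 1 then
        List.foldl (fun job j => if sc job < sc j then j else job) j1 (j1 :: rest) else j1)
      = List.foldl (fun job j => if sc job < sc j then j else job) j1 rest := by
    cases rest with
    | nil => simp
    | cons a l =>
      rw [if_pos (by simp only [List.length_cons]; omega), List.foldl_cons, if_neg (lt_irrefl _)]
  simp only [gt_iff_lt] at hAres ⊢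
  rw [hAres]
  -- characterize the third fold
  obtain ⟨p', s', hdec', hp', hs'⟩ :=
    pvFoldFirst (fun a b => sc b < sc a) (fun a b c h1 h2 => by omega)
      (fun a b h => by omega) rest j1
  rw [show List.foldl (fun acc j => if (fun a b : α => sc b < sc a) j acc then j else acc) j1 rest
        = List.foldl (fun job j => if sc job < sc j then j else job) j1 rest from rfl]
    at hdec' hp' hs'
  set r := List.foldl (fun job j => if sc job < sc j then j else job) j1 rest with hrdef
  -- characterize B's single fold
  obtain ⟨p2, s2, hdec2, hp2, hs2⟩ :=
    pvFoldFirst (fun a b => st a < st b ∨ (st a = st b ∧ -sc a < -sc b))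
      (fun a b c h1 h2 => by omega) (fun a b h => by omega) t k0
  rw [show List.foldl
        (fun acc j => if (fun a b : α => st a < st b ∨ (st a = st b ∧ -sc a < -sc b)) j acc
          then j else acc) k0 t
      = List.foldl (fun m x => if st x < st m ∨ (st x = st m ∧ -sc x < -sc m) then x else m) k0 t
      from rfl] at hdec2 hp2 hs2
  set m := List.foldl (fun m x => if st x < st m ∨ (st x = st m ∧ -sc x < -sc m) then x else m) k0 t
    with hmdef
  -- j1 is a minimum of st over the whole list
  have hminst : ∀ y ∈ k0 :: t, st j1 ≤ st y := by
    intro y hy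
    rw [hdec] at hy
    rcases List.mem_append.mp hy with h | h
    · exact le_of_lt (hp y h)
    · rcases List.mem_cons.mp h with rfl | h
      · exact le_refl _
      · have := hs y h; omega
  -- every tie element has the minimal submit time
  have hstj1mem : ∀ y ∈ j1 :: rest, st y = st j1 := by
    intro y hy
    rcases List.mem_cons.mp hy with rfl | hy
    · rfl
    · have := (List.mem_filter.mp (hrd ▸ hy)).2
      simpa using this
  have hrmem : r ∈ j1 :: rest := by
    rw [hdec']
    exact List.mem_append_right _ (List.mem_cons_self ..)
  have hstr : st r = st j1 := hstj1mem r hrmem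
  have hscmax : ∀ y ∈ j1 :: rest, sc y ≤ sc r := by
    intro y hy
    rw [hdec'] at hy
    rcases List.mem_append.mp hy with h | h
    · exact le_of_lt (hp' y h)
    · rcases List.mem_cons.mp h with rfl | h
      · exact le_refl _
      · have := hs' y h; omega
  -- A's result is never beaten
  have hminA : ∀ y ∈ k0 :: t, ¬ (st y < st r ∨ (st y = st r ∧ -sc y < -sc r)) := by
    intro y hy hlt
    have h1 := hminst y hy
    by_cases hcy : st y = st j1
    · have hmem : y ∈ j1 :: rest := by
        rw [← hfc]
        exact List.mem_filter.mpr ⟨hy, by simp [hcy]⟩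
      have h2 := hscmax y hmem
      rw [hstr] at hlt
      rcases hlt with h | ⟨h, h'⟩ <;> omega
    · rw [hstr] at hlt
      rcases hlt with h | ⟨h, h'⟩ <;> omega
  -- A's result beats everything before it
  have hfstA : ∃ P S, k0 :: t = P ++ r :: S ∧
      ∀ y ∈ P, (st r < st y ∨ (st r = st y ∧ -sc r < -sc y)) := by
    cases p' with
    | nil =>
      have h := (List.cons.injEq _ _ _ _).mp hdec'
      refine ⟨p, s, by rw [hdec, ← h.1], ?_⟩
      intro y hy
      exact Or.inl (by rw [← h.1]; exact hp y hy)
    | cons z p'' =>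
      have h := (List.cons.injEq _ _ _ _).mp hdec'
      have hscj1 : sc j1 < sc r := by
        have := hp' z (List.mem_cons_self ..)
        rwa [← h.1] at this
      obtain ⟨q, q', hsq, hqf, hq'f⟩ :=
        pvFilterSplit (fun j => st j == st j1) s p'' r s' (by rw [← hrd]; exact h.2)
      refine ⟨p ++ j1 :: q, q', ?_, ?_⟩
      · rw [hdec, hsq]; simp
      · intro y hy
        rcases List.mem_append.mp hy with hyp | hyq
        · exact Or.inl (by rw [hstr]; exact hp y hyp)
        rcases List.mem_cons.mp hyq with rfl | hyq
        · exact Or.inr ⟨by rw [hstr], by omega⟩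
        · by_cases hcy : st y = st j1
          · have hyp'' : y ∈ p'' := by
              rw [← hqf]
              exact List.mem_filter.mpr ⟨hyq, by simp [hcy]⟩
            have hlt : sc y < sc r := hp' y (List.mem_cons_of_mem _ hyp'')
            exact Or.inr ⟨by rw [hstr, hcy], by omega⟩
          · have hys : y ∈ s := by
              rw [hsq]
              exact List.mem_append_left _ hyq
            have := hs y hys
            exact Or.inl (by rw [hstr]; omega)
  -- B's result is never beaten either
  have hminB : ∀ y ∈ k0 :: t, ¬ (st y < st m ∨ (st y = st m ∧ -sc y < -sc m)) := by
    intro y hy hlt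
    rw [hdec2] at hy
    rcases List.mem_append.mp hy with h | h
    · have := hp2 y h
      rcases this with h1 | ⟨h1, h2⟩ <;> rcases hlt with h3 | ⟨h3, h4⟩ <;> omega
    · rcases List.mem_cons.mp h with rfl | h
      · rcases hlt with h3 | ⟨h3, h4⟩ <;> omega
      · exact hs2 y h hlt
  obtain ⟨P, S, hPS, hPfst⟩ := hfstA
  exact pvFirstUnique (fun a b => st a < st b ∨ (st a = st b ∧ -sc a < -sc b))
    (k0 :: t) P S p2 s2 r m hPS hdec2 hminA hminB hPfst hp2

-- ===== VERDICT (by name: the statement is the Claim_ definition above) =====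
theorem get_first_job_in_workloads_spec : Claim_equal_get_first_job_in_workloads := by
  intro W _ _
  unfold Spec_get_first_job_in_workloads
  unfold get_first_job_in_workloads get_first_job_in_workloads_alt
  dsimp only
  cases hk : (PySem.Dict.ofList W).keys with
  | nil => simp [PySem.List.min2?, PySem.List.pyGet?, PySem.List.pyIdx?]
  | cons k0 t =>
    have hget : (PySem.List.pyGet? (k0 :: t) (0 : Int)).getD "" = k0 := by
      simp [PySem.List.pyGet?, PySem.List.pyIdx?]
    rw [pvMin2Cons]
    simp only [hget]
    exact pvMainEq (fun j => pvFld (PySem.Dict.ofList W) j "submit_time")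
      (fun j => pvFld (PySem.Dict.ofList W) j "score") k0 t
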